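-- pv_equiv track=rewrite | github.com/bohlinger/wavyMini | wavyMini/utils.py | block_detection
-- ===== SOURCE A (Python) =====
-- def block_detection(time,deltalim=None):
--     if deltalim is None:
--         deltalim = 1
--     # forward check
--     idx_a = []
--     for i in range(1,len(time)):
--         delta_t = time[i]-time[i-1]
--         if delta_t>deltalim:
--             idx_a.append(i)
--     # backward check
--     idx_b = []
--     for i in range(0,len(time)-1):
--         delta_t = time[i+1]-time[i]
--         if delta_t>deltalim:
--             idx_b.append(i)
--     blocklst = []
--     for i in range(len(idx_a)):
--         if i == 0:
--             tmp = [0,idx_b[i]]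
--             blocklst.append(tmp)
--         if i < len(idx_a)-1:
--             tmp = [idx_a[i],idx_b[i+1]]
--             blocklst.append(tmp)
--         if i == len(idx_a)-1:
--             tmp = [idx_a[i],len(time)-1]
--             blocklst.append(tmp)
--     return idx_a, idx_b, blocklst
-- ===== SOURCE B (Python) =====
-- def block_detection(time, deltalim=None):
--     if deltalim is None:
--         deltalim = 1
--     idx_a = []
--     idx_b = []
--     blocklst = []
--     start = 0
--     i = 1
--     for prev, cur in zip(time, time[1:]):
--         if cur - prev > deltalim:
--             idx_a.append(i)
--             idx_b.append(i - 1)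
--             blocklst.append([start, i - 1])
--             start = i
--         i += 1
--     if idx_a:
--         blocklst.append([start, len(time) - 1])
--     return idx_a, idx_b, blocklst
-- ===== Notes on version B (the rewrite author's own statement) =====
-- stated objective: simpler
-- what changed: B is a single-pass state machine over consecutive pairs that emits idx_a, idx_b and the closed block [start, i-1] the moment a gap is seen (carrying the current block start in an accumulator) and closes the final block after the loop, instead of A's three staged index loops with positional if-branches re-reading idx_a/idx_b.
import Mathlib
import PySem

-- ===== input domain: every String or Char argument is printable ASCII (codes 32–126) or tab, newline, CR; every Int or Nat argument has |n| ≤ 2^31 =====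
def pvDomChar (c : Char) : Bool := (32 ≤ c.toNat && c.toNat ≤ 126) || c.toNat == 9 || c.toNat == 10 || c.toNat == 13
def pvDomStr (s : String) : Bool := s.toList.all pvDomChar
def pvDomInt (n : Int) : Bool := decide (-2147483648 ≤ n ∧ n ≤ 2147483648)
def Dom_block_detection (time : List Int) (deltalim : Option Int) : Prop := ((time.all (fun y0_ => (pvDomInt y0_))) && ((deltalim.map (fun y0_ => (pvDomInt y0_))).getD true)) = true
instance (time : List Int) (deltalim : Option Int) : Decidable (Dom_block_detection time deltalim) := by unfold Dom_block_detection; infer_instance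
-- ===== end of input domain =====

-- B replaces A's three staged index loops by a single pass over consecutive pairs that emits
-- idx_a, idx_b and each closed block the moment its ending gap is seen; objective: simpler.

-- ===== PORT A =====
def block_detection (time : List Int) (deltalim : Option Int) : List Int × List Int × List (List Int) :=
  let dl := deltalim.getD 1
  let n : Int := (time.length : Int)
  -- forward check
  let idx_a : List Int := (PySem.List.pyRange 1 n 1).foldl
    (fun acc i => if PySem.List.pyGetD time i 0 - PySem.List.pyGetD time (i-1) 0 > dl
                  then acc ++ [i] else acc) []
  -- backward check
  let idx_b : List Int := (PySem.List.pyRange 0 (n-1) 1).foldl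
    (fun acc i => if PySem.List.pyGetD time (i+1) 0 - PySem.List.pyGetD time i 0 > dl
                  then acc ++ [i] else acc) []
  -- note: every idx_b[i]/idx_a[i] access in A is in range (len(idx_b) = len(idx_a)), so pyGetD's default is never used
  let blocklst : List (List Int) := (PySem.List.pyRange 0 (idx_a.length : Int) 1).foldl
    (fun acc i =>
      let acc := if i = 0 then acc ++ [[0, PySem.List.pyGetD idx_b i 0]] else acc
      let acc := if i < (idx_a.length : Int) - 1
                 then acc ++ [[PySem.List.pyGetD idx_a i 0, PySem.List.pyGetD idx_b (i+1) 0]] else acc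
      if i = (idx_a.length : Int) - 1
      then acc ++ [[PySem.List.pyGetD idx_a i 0, n - 1]] else acc) []
  (idx_a, idx_b, blocklst)

-- ===== PORT B =====
-- single pass: state = (idx_a, idx_b, blocklst, start, i); zip(time, time[1:]) = time.zip (time.drop 1)
def block_detection_alt (time : List Int) (deltalim : Option Int) : List Int × List Int × List (List Int) :=
  let dl := deltalim.getD 1
  let st := (time.zip (time.drop 1)).foldl
    (fun (s : List Int × List Int × List (List Int) × Int × Int) pc =>
      let (ia, ib, bl, start, i) := s
      if pc.2 - pc.1 > dl then (ia ++ [i], ib ++ [i - 1], bl ++ [[start, i - 1]], i, i + 1)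
      else (ia, ib, bl, start, i + 1)) ([], [], [], 0, 1)
  let (ia, ib, bl, start, _) := st
  (ia, ib, if ia.isEmpty then bl else bl ++ [[start, (time.length : Int) - 1]])

-- ===== PRECONDITION & SPEC =====
def Spec_block_detection (time : List Int) (deltalim : Option Int) (out : List Int × List Int × List (List Int)) : Prop := out = block_detection_alt time deltalim
instance (time : List Int) (deltalim : Option Int) (out : List Int × List Int × List (List Int)) : Decidable (Spec_block_detection time deltalim out) := by unfold Spec_block_detection; infer_instance

-- ===== CLAIM (what is proved, stated in full; the proofs are below) =====
def Claim_equal_block_detection : Prop := ∀ (time : List Int) (deltalim : Option Int), Dom_block_detection time deltalim → Spec_block_detection time deltalim (block_detection time deltalim)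

-- ===== LEMMAS AND PROOFS =====

-- A's forward loop equals the gap filter.
theorem idx_a_eq (time : List Int) (dl : Int) :
    (PySem.List.pyRange 1 (time.length : Int) 1).foldl
      (fun acc i => if PySem.List.pyGetD time i 0 - PySem.List.pyGetD time (i-1) 0 > dl
                    then acc ++ [i] else acc) [] =
    (PySem.List.pyRange 1 (time.length : Int) 1).filter
      (fun i => decide (PySem.List.pyGetD time i 0 - PySem.List.pyGetD time (i-1) 0 > dl)) := by
  rw [PySem.List.foldl_append_ite_eq_filter]
  simp

-- A's backward loop equals the gap filter, each element shifted down by one.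
theorem idx_b_eq (time : List Int) (dl : Int) :
    (PySem.List.pyRange 0 ((time.length : Int) - 1) 1).foldl
      (fun acc i => if PySem.List.pyGetD time (i+1) 0 - PySem.List.pyGetD time i 0 > dl
                    then acc ++ [i] else acc) [] =
    ((PySem.List.pyRange 1 (time.length : Int) 1).filter
      (fun i => decide (PySem.List.pyGetD time i 0 - PySem.List.pyGetD time (i-1) 0 > dl))).map (fun g => g - 1) := by
  rw [PySem.List.foldl_append_ite_eq_filter]
  rw [PySem.List.pyRange_one 0, PySem.List.pyRange_one 1]
  have h : ((time.length : Int) - 1 - 0).toNat = ((time.length : Int) - 1).toNat := by omega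
  simp only [List.filter_map, List.map_map, h]
  have hp : ((fun i => decide (dl < PySem.List.pyGetD time (i+1) 0 - PySem.List.pyGetD time i 0)) ∘ fun k : Nat => 0 + (k : Int))
          = ((fun i => decide (dl < PySem.List.pyGetD time i 0 - PySem.List.pyGetD time (i-1) 0)) ∘ fun k : Nat => 1 + (k : Int)) := by
    funext k
    simp only [Function.comp]
    norm_num [add_comm (k:Int) 1]
  have hf : (fun k : Nat => 0 + (k : Int)) = ((fun g : Int => g - 1) ∘ fun k : Nat => 1 + (k : Int)) := by
    funext k; simp [Function.comp]
  rw [hp, hf]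
  simp

-- The loop body of A's blocklst pass, over an arbitrary gap list g (idx_a = g, idx_b = g.map (·-1)).
def pvBody (g : List Int) (n : Int) (acc : List (List Int)) (i : Int) : List (List Int) :=
  let acc := if i = 0 then acc ++ [[0, PySem.List.pyGetD (g.map (fun x => x - 1)) i 0]] else acc
  let acc := if i < (g.length : Int) - 1
             then acc ++ [[PySem.List.pyGetD g i 0, PySem.List.pyGetD (g.map (fun x => x - 1)) (i+1) 0]] else acc
  if i = (g.length : Int) - 1 then acc ++ [[PySem.List.pyGetD g i 0, n - 1]] else acc

theorem getD_map_sub (g : List Int) (m : Nat) (h : m < g.length) :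
    (g.map (fun x => x - 1)).getD m 0 = g.getD m 0 - 1 := by
  simp [List.getD, h]

theorem pvBody_zero (g : List Int) (n : Int) (h : 2 ≤ g.length) (acc : List (List Int)) :
    pvBody g n acc 0 = acc ++ [[0, g.getD 0 0 - 1], [g.getD 0 0, g.getD 1 0 - 1]] := by
  unfold pvBody
  split_ifs with c1 c2 c3 <;> try omega
  have z1 : (0:Int) + 1 = ((1:Nat):Int) := by norm_num
  rw [z1]
  simp only [show (0:Int) = ((0:Nat):Int) from rfl, PySem.List.pyGetD_natCast]
  push_cast
  rw [getD_map_sub g 0 (by omega), getD_map_sub g 1 (by omega)]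
  simp

theorem pvBody_mid (g : List Int) (n : Int) (m : Nat) (h1 : 1 ≤ m) (h2 : m + 1 < g.length)
    (acc : List (List Int)) :
    pvBody g n acc (m : Int) = acc ++ [[g.getD m 0, g.getD (m+1) 0 - 1]] := by
  unfold pvBody
  split_ifs with c1 c2 c3 <;> try omega
  have z1 : (m:Int) + 1 = ((m+1:Nat):Int) := by push_cast; ring
  rw [z1]
  simp only [PySem.List.pyGetD_natCast]
  rw [getD_map_sub g (m+1) (by omega)]

theorem pvBody_last (g : List Int) (n : Int) (m : Nat) (h1 : 1 ≤ m) (h2 : m + 1 = g.length)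
    (acc : List (List Int)) :
    pvBody g n acc (m : Int) = acc ++ [[g.getD m 0, n - 1]] := by
  unfold pvBody
  split_ifs with c1 c2 c3 <;> try omega
  simp only [PySem.List.pyGetD_natCast]

theorem take_succ_getD (g : List Int) (m : Nat) (h : m < g.length) :
    g.take (m+1) = g.take m ++ [g.getD m 0] := by
  rw [List.take_add_one]
  simp [List.getD, h]

-- Invariant of A's blocklst loop after the first m (1 ≤ m ≤ len g - 1) iterations.
theorem blocks_inv (g : List Int) (n : Int) (m : Nat) (h1 : 1 ≤ m) (h2 : m + 1 ≤ g.length) :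
    (PySem.List.pyRange 0 (m : Int) 1).foldl (pvBody g n) [] =
    ((0 :: g.take m).zip ((g.take (m+1)).map (fun x => x - 1))).map (fun p => [p.1, p.2]) := by
  induction m, h1 using Nat.le_induction with
  | base =>
    have hr : PySem.List.pyRange 0 ((1:Nat) : Int) 1 = [0] := by
      simpa using PySem.List.pyRange_one_singleton (a := 0)
    rw [hr]
    simp only [List.foldl_cons, List.foldl_nil]
    rw [pvBody_zero g n (by omega) []]
    rw [take_succ_getD g 1 (by omega), take_succ_getD g 0 (by omega)]
    simp
  | succ m h1 ih =>
    have hr : PySem.List.pyRange 0 ((m+1 : Nat) : Int) 1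
        = PySem.List.pyRange 0 (m : Int) 1 ++ [(m : Int)] := by
      have := PySem.List.pyRange_one_succ_right (a := 0) (b := (m : Int)) (by positivity)
      push_cast
      simpa using this
    rw [hr, List.foldl_append]
    simp only [List.foldl_cons, List.foldl_nil]
    rw [ih (by omega), pvBody_mid g n m h1 (by omega)]
    have e1 : (0:Int) :: g.take (m+1) = (0 :: g.take m) ++ [g.getD m 0] := by
      rw [take_succ_getD g m (by omega)]; simp
    have e2 : (g.take (m+1+1)).map (fun x => x - 1)
        = ((g.take (m+1)).map (fun x => x - 1)) ++ [g.getD (m+1) 0 - 1] := by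
      rw [take_succ_getD g (m+1) (by omega)]; simp
    rw [e1, e2]
    rw [List.zip_append (by simp [List.length_take]; omega)]
    simp

-- A's whole blocklst loop, over an arbitrary gap list g, equals the zip form.
theorem blocks_eq_core (g : List Int) (n : Int) :
    (PySem.List.pyRange 0 (g.length : Int) 1).foldl (pvBody g n) [] =
    (if g.isEmpty then []
     else ((0 :: g).zip (g.map (fun x => x - 1) ++ [n - 1])).map (fun p => [p.1, p.2])) := by
  match g with
  | [] => simp
  | [a] =>
    have hr : PySem.List.pyRange 0 ((1:Nat) : Int) 1 = [0] := by
      simpa using PySem.List.pyRange_one_singleton (a := 0)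
    simp only [List.length_cons, List.length_nil]
    rw [hr]
    simp [pvBody, PySem.List.pyGetD_zero]
  | a :: b :: t =>
    set g' := a :: b :: t with hg
    have hlen : 2 ≤ g'.length := by simp [hg]
    have hk : ((g'.length : Nat) : Int) = ((g'.length - 1 : Nat) : Int) + 1 := by omega
    have hr : PySem.List.pyRange 0 (g'.length : Int) 1
        = PySem.List.pyRange 0 ((g'.length - 1 : Nat) : Int) 1 ++ [((g'.length - 1 : Nat) : Int)] := by
      rw [hk]
      exact PySem.List.pyRange_one_succ_right (by positivity)
    rw [hr, List.foldl_append]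
    simp only [List.foldl_cons, List.foldl_nil]
    rw [blocks_inv g' n (g'.length - 1) (by omega) (by omega)]
    rw [pvBody_last g' n (g'.length - 1) (by omega) (by omega)]
    have htk : g'.take (g'.length - 1 + 1) = g' := by
      rw [show g'.length - 1 + 1 = g'.length by omega]; exact List.take_length
    have e1 : (0:Int) :: g' = (0 :: g'.take (g'.length - 1)) ++ [g'.getD (g'.length - 1) 0] := by
      conv_lhs => rw [← htk, take_succ_getD g' (g'.length - 1) (by omega)]
      simp
    have e2 : g'.map (fun x => x - 1) ++ [n - 1]
        = ((g'.take (g'.length - 1 + 1)).map (fun x => x - 1)) ++ [n - 1] := by rw [htk]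
    rw [if_neg (by simp [hg]), e1, e2]
    rw [List.zip_append (by simp [List.length_take]; omega)]
    simp

-- blocks_eq_core, restated with the loop body written out as A's lambda (definitional).
theorem blocks_eq (g : List Int) (n : Int) :
    (PySem.List.pyRange 0 (g.length : Int) 1).foldl
      (fun acc i =>
        let acc := if i = 0 then acc ++ [[0, PySem.List.pyGetD (g.map (fun x => x - 1)) i 0]] else acc
        let acc := if i < (g.length : Int) - 1
                   then acc ++ [[PySem.List.pyGetD g i 0, PySem.List.pyGetD (g.map (fun x => x - 1)) (i+1) 0]] else acc
        if i = (g.length : Int) - 1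
        then acc ++ [[PySem.List.pyGetD g i 0, n - 1]] else acc) [] =
    (if g.isEmpty then []
     else ((0 :: g).zip (g.map (fun x => x - 1) ++ [n - 1])).map (fun p => [p.1, p.2])) :=
  blocks_eq_core g n

-- ---- B-side characterization ----

-- gap indices of a pair list, first pair getting index i0
def pvGapIdx (dl : Int) : List (Int × Int) → Int → List Int
  | [], _ => []
  | p :: rest, i0 => (if p.2 - p.1 > dl then [i0] else []) ++ pvGapIdx dl rest (i0 + 1)

-- B's fold, fully characterized by the gap indices of its pair list.
theorem alt_fold_char (dl : Int) (ps : List (Int × Int)) (i0 : Int)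
    (ia ib : List Int) (bl : List (List Int)) (s0 : Int) :
    ps.foldl
      (fun (s : List Int × List Int × List (List Int) × Int × Int) pc =>
        let (ia, ib, bl, start, i) := s
        if pc.2 - pc.1 > dl then (ia ++ [i], ib ++ [i - 1], bl ++ [[start, i - 1]], i, i + 1)
        else (ia, ib, bl, start, i + 1)) (ia, ib, bl, s0, i0) =
    (ia ++ pvGapIdx dl ps i0,
     ib ++ (pvGapIdx dl ps i0).map (fun g => g - 1),
     bl ++ (((s0 :: pvGapIdx dl ps i0).zip ((pvGapIdx dl ps i0).map (fun g => g - 1))).map (fun p => [p.1, p.2])),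
     (pvGapIdx dl ps i0).getLastD s0,
     i0 + (ps.length : Int)) := by
  induction ps generalizing i0 ia ib bl s0 with
  | nil => simp [pvGapIdx]
  | cons p rest ih =>
    by_cases hp : p.2 - p.1 > dl
    · simp only [List.foldl_cons, if_pos hp]
      rw [ih]
      simp only [pvGapIdx, if_pos hp, Prod.mk.injEq]
      refine ⟨by simp, by simp, ?_, ?_, by simp; ring⟩
      · simp [List.zip_cons_cons]
      · cases pvGapIdx dl rest (i0 + 1) <;> simp [List.getLastD]
    · simp only [List.foldl_cons, if_neg hp]
      rw [ih]
      simp only [pvGapIdx, if_neg hp, Prod.mk.injEq, List.nil_append]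
      refine ⟨trivial, trivial, trivial, trivial, by simp; ring⟩

-- bridge: the gap indices of time's consecutive pairs ARE the gap filter, over any suffix
theorem gapIdx_drop (dl : Int) (time : List Int) (j : Nat) :
    pvGapIdx dl ((time.drop j).zip (time.drop (j+1))) ((j : Int) + 1) =
    (PySem.List.pyRange ((j : Int) + 1) (time.length : Int) 1).filter
      (fun i => decide (PySem.List.pyGetD time i 0 - PySem.List.pyGetD time (i-1) 0 > dl)) := by
  induction hk : time.length - j generalizing j with
  | zero =>
    have h1 : time.drop (j+1) = [] := by
      apply List.drop_eq_nil_of_le; omega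
    rw [h1, List.zip_nil_right]
    rw [PySem.List.pyRange_one_eq_nil (by omega)]
    simp [pvGapIdx]
  | succ k ih =>
    by_cases hj1 : j + 1 < time.length
    · have hd0 : time.drop j = time[j] :: time.drop (j+1) :=
        List.drop_eq_getElem_cons (by omega)
      have hd1 : time.drop (j+1) = time[j+1] :: time.drop (j+2) :=
        List.drop_eq_getElem_cons (by omega)
      rw [hd0, hd1, List.zip_cons_cons, ← hd1]
      have hr : PySem.List.pyRange ((j : Int) + 1) (time.length : Int) 1
          = ((j : Int) + 1) :: PySem.List.pyRange ((j : Int) + 1 + 1) (time.length : Int) 1 :=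
        PySem.List.pyRange_one_cons (by omega)
      rw [hr, List.filter_cons]
      have hget : PySem.List.pyGetD time ((j : Int) + 1) 0 - PySem.List.pyGetD time ((j : Int) + 1 - 1) 0
          = time[j+1] - time[j] := by
        have e1 : (j : Int) + 1 = ((j + 1 : Nat) : Int) := by push_cast; ring
        rw [e1, show ((j + 1 : Nat) : Int) - 1 = ((j : Nat) : Int) by push_cast; ring]
        rw [PySem.List.pyGetD_natCast, PySem.List.pyGetD_natCast]
        simp [List.getD, hj1, show j < time.length by omega]
      have hih := ih (j + 1) (by omega)
      have e3 : ((j + 1 : Nat) : Int) + 1 = (j : Int) + 1 + 1 := by push_cast; ring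
      rw [e3] at hih
      simp only [pvGapIdx, hih, hget]
      by_cases hc : time[j+1] - time[j] > dl
      · simp [hc]
      · simp [hc]
    · have h1 : time.drop (j+1) = [] := by
        apply List.drop_eq_nil_of_le; omega
      rw [h1, List.zip_nil_right]
      rw [PySem.List.pyRange_one_eq_nil (by omega)]
      simp [pvGapIdx]

theorem gapIdx_time (dl : Int) (time : List Int) :
    pvGapIdx dl (time.zip (time.drop 1)) 1 =
    (PySem.List.pyRange 1 (time.length : Int) 1).filter
      (fun i => decide (PySem.List.pyGetD time i 0 - PySem.List.pyGetD time (i-1) 0 > dl)) := by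
  have := gapIdx_drop dl time 0
  simpa using this

-- closing the last block: zip against (ends ++ [n-1]) = zip against ends, plus the last pair
theorem zip_snoc_gen (f : Int → Int) (e : Int) (G : List Int) : ∀ (a : Int), G ≠ [] →
    (a :: G).zip (G.map f ++ [e]) = (a :: G).zip (G.map f) ++ [(G.getLastD a, e)] := by
  induction G with
  | nil => intro a h; exact absurd rfl h
  | cons b G' ih =>
    intro a _
    cases G' with
    | nil => simp [List.getLastD]
    | cons c t =>
      have step : (a :: b :: c :: t).zip (((b :: c :: t).map f) ++ [e])
          = (a, f b) :: ((b :: c :: t).zip (((c :: t).map f) ++ [e])) := rfl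
      rw [step, ih b (by simp)]
      simp [List.getLastD]

theorem zip_snoc_last (G : List Int) (e : Int) (hG : G ≠ []) :
    ((0 :: G).zip (G.map (fun g => g - 1) ++ [e])).map (fun p => ([p.1, p.2] : List Int)) =
    ((0 :: G).zip (G.map (fun g => g - 1))).map (fun p => ([p.1, p.2] : List Int)) ++ [[G.getLastD 0, e]] := by
  rw [zip_snoc_gen _ e G 0 hG]
  simp

-- ===== VERDICT (by name: the statement is the Claim_ definition above) =====
theorem block_detection_spec : Claim_equal_block_detection := by
  intro time deltalim _
  unfold Spec_block_detection block_detection block_detection_alt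
  simp only []
  rw [idx_a_eq time (deltalim.getD 1), idx_b_eq time (deltalim.getD 1)]
  rw [blocks_eq]
  rw [alt_fold_char, gapIdx_time]
  set G := (PySem.List.pyRange 1 (time.length : Int) 1).filter
      (fun i => decide (PySem.List.pyGetD time i 0 - PySem.List.pyGetD time (i-1) 0 > deltalim.getD 1)) with hG
  simp only [List.nil_append]
  by_cases h : G = []
  · simp [h]
  · rw [if_neg (by simpa using h), if_neg (by simpa using h)]
    rw [zip_snoc_last G _ h]
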